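-- pv_equiv track=rewrite | github.com/areumsim/Lfactory-anomaly-explainer | experiments/metrics.py | segments_from_labels
-- ===== SOURCE A (Python) =====
-- from typing import Dict, Iterable, Tuple
--
-- def segments_from_labels(labels: Iterable[int]) -> list[tuple[int, int]]:
--     """Extract contiguous positive segments (start,end inclusive) from 0/1 labels.
--
--     Note: Materializes `labels` to a list to avoid iterator consumption issues.
--     """
--     arr = [int(x) for x in labels]
--     segs: list[tuple[int, int]] = []
--     start = -1
--     for i, v in enumerate(arr):
--         if v == 1 and start == -1:
--             start = i
--         elif v == 0 and start != -1:
--             segs.append((start, i - 1))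
--             start = -1
--     if start != -1:
--         segs.append((start, len(arr) - 1))
--     return segs
-- ===== SOURCE B (Python) =====
-- def segments_from_labels(labels):
--     """Two-pass: forward-fill an in-segment mask, then extract maximal True runs."""
--     mask = []
--     state = False
--     for x in labels:
--         v = int(x)
--         if v == 1:
--             state = True
--         elif v == 0:
--             state = False
--         mask.append(state)
--     segs = []
--     i = 0
--     n = len(mask)
--     while i < n:
--         j = i + 1
--         while j < n and mask[j] == mask[i]:
--             j += 1
--         if mask[i]:
--             segs.append((i, j - 1))
--         i = j
--     return segs
-- ===== Notes on version B (the rewrite author's own statement) =====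
-- stated objective: alternative
-- what changed: Replaced the single open/close toggle loop (carrying a pending start index and emitting segments on transitions and at the end) by a build-then-extract decomposition: first forward-fill a boolean in-segment mask (last exact-0/exact-1 value wins, non-0/1 values carry the state), then extract maximal runs of True from the mask as inclusive (start,end) pairs.
import Mathlib
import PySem

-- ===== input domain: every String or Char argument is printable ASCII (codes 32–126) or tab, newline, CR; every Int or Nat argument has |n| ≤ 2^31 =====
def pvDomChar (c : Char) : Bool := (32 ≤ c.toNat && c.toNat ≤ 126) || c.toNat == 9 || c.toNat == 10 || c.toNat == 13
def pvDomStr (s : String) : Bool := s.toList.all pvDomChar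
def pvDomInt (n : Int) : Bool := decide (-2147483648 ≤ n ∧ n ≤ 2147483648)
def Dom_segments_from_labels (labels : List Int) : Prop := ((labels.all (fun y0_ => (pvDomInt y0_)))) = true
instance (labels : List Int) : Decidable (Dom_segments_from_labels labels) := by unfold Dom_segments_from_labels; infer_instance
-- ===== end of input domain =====

-- B replaces A's single open/close toggle loop by a two-pass build-then-extract
-- decomposition (forward-filled boolean mask, then maximal True runs); alternative
-- structure, same O(n) cost.

-- ===== PORT A =====
-- the enumerate loop: state is (segs, start), i the running index
def pvALoop (arr : List Int) (segs : List (Int × Int)) (start : Int) (i : Int) :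
    List (Int × Int) × Int :=
  match arr with
  | [] => (segs, start)
  | v :: rest =>
    if v = 1 ∧ start = -1 then pvALoop rest segs i (i + 1)
    else if v = 0 ∧ start ≠ -1 then pvALoop rest (segs ++ [(start, i - 1)]) (-1) (i + 1)
    else pvALoop rest segs start (i + 1)

def segments_from_labels (labels : List Int) : List (Int × Int) :=
  let arr := labels.map (fun x => x)   -- arr = [int(x) for x in labels] (int is identity on int)
  let r := pvALoop arr [] (-1) 0
  if r.2 ≠ -1 then r.1 ++ [(r.2, (arr.length : Int) - 1)] else r.1

-- ===== PORT B =====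
-- pass 1: forward-fill the in-segment mask (exact 1 opens, exact 0 closes, else carry state)
def pvBuildMask (labels : List Int) (state : Bool) : List Bool :=
  match labels with
  | [] => []
  | x :: rest =>
    let state' := if x = 1 then true else if x = 0 then false else state
    state' :: pvBuildMask rest state'

-- pass 2: the two while-loops; the inner while over the equal-valued run is takeWhile/dropWhile
def pvRuns (mask : List Bool) (i : Int) : List (Int × Int) :=
  match mask with
  | [] => []
  | b :: rest =>
    let n := (rest.takeWhile (· == b)).length
    let rest' := rest.dropWhile (· == b)
    (if b then [(i, i + n)] else []) ++ pvRuns rest' (i + n + 1)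
termination_by mask.length
decreasing_by
  have := List.length_dropWhile_le (p := (· == b)) (l := rest)
  simp; omega

def segments_from_labels_alt (labels : List Int) : List (Int × Int) :=
  pvRuns (pvBuildMask labels false) 0

-- ===== PRECONDITION & SPEC =====
def Spec_segments_from_labels (labels : List Int) (out : List (Int × Int)) : Prop := out = segments_from_labels_alt labels
instance (labels : List Int) (out : List (Int × Int)) : Decidable (Spec_segments_from_labels labels out) := by unfold Spec_segments_from_labels; infer_instance

-- ===== CLAIM (what is proved, stated in full; the proofs are below) =====
def Claim_equal_segments_from_labels : Prop := ∀ (labels : List Int), Dom_segments_from_labels labels → Spec_segments_from_labels labels (segments_from_labels labels)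

-- ===== LEMMAS AND PROOFS =====

-- proof-side reference: elementwise run extraction carrying an optional open start
def pvScan (o : Option Int) (mask : List Bool) (i : Int) : List (Int × Int) :=
  match mask, o with
  | [], some s => [(s, i - 1)]
  | [], none => []
  | true :: rest, some s => pvScan (some s) rest (i + 1)
  | false :: rest, some s => (s, i - 1) :: pvScan none rest (i + 1)
  | true :: rest, none => pvScan (some i) rest (i + 1)
  | false :: rest, none => pvScan none rest (i + 1)

theorem pvScan_open (mask : List Bool) (s i : Int) :
    pvScan (some s) mask i =
      (s, i + (mask.takeWhile (· == true)).length - 1) ::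
        pvScan none (mask.dropWhile (· == true)) (i + (mask.takeWhile (· == true)).length) := by
  induction mask generalizing i with
  | nil => simp [pvScan]
  | cons b rest ih =>
    cases b with
    | false => simp [pvScan, List.takeWhile, List.dropWhile]
    | true =>
      simp only [pvScan, List.takeWhile, List.dropWhile, BEq.rfl]
      rw [ih]; simp only [List.length_cons]; push_cast; ring_nf

theorem pvScan_closed_false (mask : List Bool) (i : Int) :
    pvScan none mask i =
      pvScan none (mask.dropWhile (· == false)) (i + (mask.takeWhile (· == false)).length) := by
  induction mask generalizing i with
  | nil => simp [pvScan]
  | cons b rest ih =>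
    cases b with
    | true => simp [List.takeWhile, List.dropWhile]
    | false =>
      simp only [pvScan, List.takeWhile, List.dropWhile, BEq.rfl]
      rw [ih]; simp only [List.length_cons]; push_cast; ring_nf

theorem pvRuns_eq_scan (mask : List Bool) (i : Int) :
    pvRuns mask i = pvScan none mask i := by
  induction hn : mask.length using Nat.strong_induction_on generalizing mask i with
  | _ n ih =>
    cases mask with
    | nil => simp [pvRuns, pvScan]
    | cons b rest =>
      simp only [List.length_cons] at hn
      have hdw : (rest.dropWhile (· == b)).length ≤ rest.length :=
        List.length_dropWhile_le _ _
      cases b with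
      | true =>
        rw [pvRuns, pvScan, pvScan_open,
          ih (rest.dropWhile (· == true)).length (by omega) _ _ rfl]
        simp only [if_pos trivial, List.singleton_append]
        ring_nf
      | false =>
        rw [pvRuns, pvScan, pvScan_closed_false,
          ih (rest.dropWhile (· == false)).length (by omega) _ _ rfl]
        simp only [Bool.false_eq_true, if_neg (by simp : ¬False), List.nil_append]
        ring_nf

theorem mask_cons_one (rest : List Int) (st : Bool) :
    pvBuildMask (1 :: rest) st = true :: pvBuildMask rest true := by
  simp [pvBuildMask]

theorem mask_cons_zero (rest : List Int) (st : Bool) :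
    pvBuildMask (0 :: rest) st = false :: pvBuildMask rest false := by
  simp [pvBuildMask]

theorem mask_cons_other (v : Int) (rest : List Int) (st : Bool)
    (hv1 : ¬v = 1) (hv0 : ¬v = 0) :
    pvBuildMask (v :: rest) st = st :: pvBuildMask rest st := by
  simp [pvBuildMask, hv1, hv0]

-- the A-side loop, finalized, equals the mask scan: the main invariant
theorem pvALoop_eq_scan (arr : List Int) (segs : List (Int × Int)) (s i : Int)
    (hi : 0 ≤ i) :
    (if (pvALoop arr segs s i).2 ≠ -1 then
        (pvALoop arr segs s i).1 ++ [((pvALoop arr segs s i).2, i + (arr.length : Int) - 1)]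
      else (pvALoop arr segs s i).1)
    = segs ++ pvScan (if s = -1 then none else some s)
        (pvBuildMask arr (if s = -1 then false else true)) i := by
  induction arr generalizing segs s i with
  | nil =>
    by_cases hs : s = -1 <;> simp [pvALoop, pvBuildMask, pvScan, hs]
  | cons v rest ih =>
    by_cases hv1 : v = 1
    · subst hv1
      by_cases hs : s = -1
      · have step : pvALoop (1 :: rest) segs s i = pvALoop rest segs i (i + 1) := by
          simp only [pvALoop]; rw [if_pos ⟨trivial, hs⟩]
        rw [step]
        simp only [if_pos hs]
        rw [mask_cons_one]
        simp only [pvScan, List.length_cons]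
        have h := ih segs i (i + 1) (by omega)
        simp only [if_neg (show ¬(i : Int) = -1 by omega)] at h
        push_cast
        ring_nf at h ⊢
        exact h
      · have step : pvALoop (1 :: rest) segs s i = pvALoop rest segs s (i + 1) := by
          simp only [pvALoop]
          rw [if_neg (by tauto), if_neg (by norm_num)]
        rw [step]
        simp only [if_neg hs]
        rw [mask_cons_one]
        simp only [pvScan, List.length_cons]
        have h := ih segs s (i + 1) (by omega)
        simp only [if_neg hs] at h
        push_cast
        ring_nf at h ⊢
        exact h
    · by_cases hv0 : v = 0
      · subst hv0
        by_cases hs : s = -1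
        · have step : pvALoop (0 :: rest) segs s i = pvALoop rest segs s (i + 1) := by
            simp only [pvALoop]
            rw [if_neg (by norm_num), if_neg (by tauto)]
          rw [step]
          simp only [if_pos hs]
          rw [mask_cons_zero]
          simp only [pvScan, List.length_cons]
          have h := ih segs s (i + 1) (by omega)
          simp only [if_pos hs] at h
          push_cast
          ring_nf at h ⊢
          exact h
        · have step : pvALoop (0 :: rest) segs s i =
              pvALoop rest (segs ++ [(s, i - 1)]) (-1) (i + 1) := by
            simp only [pvALoop]
            rw [if_neg (by norm_num), if_pos ⟨trivial, hs⟩]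
          rw [step]
          simp only [if_neg hs]
          rw [mask_cons_zero]
          simp only [pvScan, List.length_cons]
          have h := ih (segs ++ [(s, i - 1)]) (-1) (i + 1) (by omega)
          simp only [reduceIte] at h
          rw [List.append_assoc] at h
          simp only [List.singleton_append] at h
          push_cast
          ring_nf at h ⊢
          exact h
      · have step : pvALoop (v :: rest) segs s i = pvALoop rest segs s (i + 1) := by
          simp only [pvALoop]
          rw [if_neg (by tauto), if_neg (by tauto)]
        rw [step]
        have h := ih segs s (i + 1) (by omega)
        by_cases hs : s = -1
        · simp only [if_pos hs]
          rw [mask_cons_other v rest false hv1 hv0]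
          simp only [pvScan, List.length_cons]
          simp only [if_pos hs] at h
          push_cast
          ring_nf at h ⊢
          exact h
        · simp only [if_neg hs]
          rw [mask_cons_other v rest true hv1 hv0]
          simp only [pvScan, List.length_cons]
          simp only [if_neg hs] at h
          push_cast
          ring_nf at h ⊢
          exact h

-- ===== VERDICT (by name: the statement is the Claim_ definition above) =====
theorem segments_from_labels_spec : Claim_equal_segments_from_labels := by
  intro labels _
  unfold Spec_segments_from_labels
  show segments_from_labels labels = segments_from_labels_alt labels
  simp only [segments_from_labels, segments_from_labels_alt, List.map_id_fun']
  rw [pvRuns_eq_scan]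
  have h := pvALoop_eq_scan labels [] (-1) 0 (by omega)
  simp only [reduceIte, List.nil_append] at h
  ring_nf at h ⊢
  exact h
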